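-- pv_equiv track=rewrite | github.com/lpennisi73-tech/BOOKWORM | KernelCustomManager/core/secureboot_manager.py | _parse_mok_list
-- ===== SOURCE A (Python) =====
-- def _parse_mok_list(output):
--     """Parse la sortie de mokutil --list-enrolled"""
--     keys = []
--     current_key = {}
--
--     for line in output.split('\n'):
--         line = line.strip()
--
--         if line.startswith('[key '):
--             if current_key:
--                 keys.append(current_key)
--             current_key = {'index': line}
--         elif 'Subject:' in line or 'CN=' in line:
--             current_key['subject'] = line.split('Subject:')[-1].strip() if 'Subject:' in line else line
--         elif 'Issuer:' in line:
--             current_key['issuer'] = line.split('Issuer:')[-1].strip()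
--         elif 'Not Before:' in line:
--             current_key['not_before'] = line.split('Not Before:')[-1].strip()
--         elif 'Not After:' in line:
--             current_key['not_after'] = line.split('Not After:')[-1].strip()
--
--     if current_key:
--         keys.append(current_key)
--
--     return keys
-- ===== SOURCE B (Python) =====
-- def _parse_mok_list(output):
--     """Parse la sortie de mokutil --list-enrolled"""
--     lines = [l.strip() for l in output.split('\n')]
--
--     # partition into a leading block and one block per '[key ' header line
--     lead, blocks, cur = [], [], None
--     for line in lines:
--         if line.startswith('[key '):
--             if cur is not None:
--                 blocks.append(cur)
--             cur = [line]
--         elif cur is None: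
--             lead.append(line)
--         else:
--             cur.append(line)
--     if cur is not None:
--         blocks.append(cur)
--
--     def scan(d, body):
--         for line in body:
--             if 'Subject:' in line or 'CN=' in line:
--                 d['subject'] = line.split('Subject:')[-1].strip() if 'Subject:' in line else line
--             elif 'Issuer:' in line:
--                 d['issuer'] = line.split('Issuer:')[-1].strip()
--             elif 'Not Before:' in line:
--                 d['not_before'] = line.split('Not Before:')[-1].strip()
--             elif 'Not After:' in line:
--                 d['not_after'] = line.split('Not After:')[-1].strip()
--         return d
--
--     dicts = [scan({}, lead)] + [scan({'index': b[0]}, b[1:]) for b in blocks]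
--     return [d for d in dicts if d]
-- ===== Notes on version B (the rewrite author's own statement) =====
-- stated objective: alternative
-- what changed: A threads one mutable current-dict through a single stateful loop with flush-on-header; B first partitions the stripped lines into a leading block plus one block per key-header line, then maps each block independently to its dict and drops empty ones.
import Mathlib
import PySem

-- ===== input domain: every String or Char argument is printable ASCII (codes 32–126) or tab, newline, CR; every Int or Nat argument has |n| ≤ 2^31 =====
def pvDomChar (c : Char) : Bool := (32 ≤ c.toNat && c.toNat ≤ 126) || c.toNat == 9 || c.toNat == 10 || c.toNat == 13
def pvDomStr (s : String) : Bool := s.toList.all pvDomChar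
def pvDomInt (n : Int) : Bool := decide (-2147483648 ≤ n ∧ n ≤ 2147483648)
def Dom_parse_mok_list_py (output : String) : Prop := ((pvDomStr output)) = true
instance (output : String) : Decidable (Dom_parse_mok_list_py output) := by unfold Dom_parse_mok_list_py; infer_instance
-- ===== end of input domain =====

-- B re-decomposes A's single stateful loop into: partition the lines into a leading block
-- plus one block per '[key ' header, then map each block to its dict and drop empty dicts
-- (objective: alternative decomposition, same O(n) cost; same values everywhere).

-- ===== PORT A =====
-- the body of A's for-loop over (keys, current_key)
def pvAStep (st : List (List (String × String)) × PySem.Dict String String) (raw : String) :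
    List (List (String × String)) × PySem.Dict String String :=
  let line := PySem.Str.strip raw
  if PySem.Str.startswith line "[key " then
    (if st.2.items.isEmpty then st.1 else st.1 ++ [st.2.items],
     PySem.Dict.ofList [("index", line)])
  else if PySem.Str.isIn "Subject:" line || PySem.Str.isIn "CN=" line then
    (st.1, st.2.insert "subject"
      (if PySem.Str.isIn "Subject:" line then
        PySem.Str.strip (((PySem.Str.split? line "Subject:").getD []).getLastD "") else line))
  else if PySem.Str.isIn "Issuer:" line then
    (st.1, st.2.insert "issuer" (PySem.Str.strip (((PySem.Str.split? line "Issuer:").getD []).getLastD "")))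
  else if PySem.Str.isIn "Not Before:" line then
    (st.1, st.2.insert "not_before" (PySem.Str.strip (((PySem.Str.split? line "Not Before:").getD []).getLastD "")))
  else if PySem.Str.isIn "Not After:" line then
    (st.1, st.2.insert "not_after" (PySem.Str.strip (((PySem.Str.split? line "Not After:").getD []).getLastD "")))
  else st

def parse_mok_list_py (output : String) : List (List (String × String)) :=
  let st := ((PySem.Str.split? output "\n").getD []).foldl pvAStep ([], PySem.Dict.empty)
  if st.2.items.isEmpty then st.1 else st.1 ++ [st.2.items]

-- ===== PORT B =====
-- B's scan: the marker chain applied to one (already stripped) non-header line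
def pvLineDict (d : PySem.Dict String String) (line : String) : PySem.Dict String String :=
  if PySem.Str.isIn "Subject:" line || PySem.Str.isIn "CN=" line then
    d.insert "subject"
      (if PySem.Str.isIn "Subject:" line then
        PySem.Str.strip (((PySem.Str.split? line "Subject:").getD []).getLastD "") else line)
  else if PySem.Str.isIn "Issuer:" line then
    d.insert "issuer" (PySem.Str.strip (((PySem.Str.split? line "Issuer:").getD []).getLastD ""))
  else if PySem.Str.isIn "Not Before:" line then
    d.insert "not_before" (PySem.Str.strip (((PySem.Str.split? line "Not Before:").getD []).getLastD ""))
  else if PySem.Str.isIn "Not After:" line then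
    d.insert "not_after" (PySem.Str.strip (((PySem.Str.split? line "Not After:").getD []).getLastD ""))
  else d

def pvScan (d : PySem.Dict String String) (body : List String) : PySem.Dict String String :=
  body.foldl pvLineDict d

-- B's partition loop body over (lead, blocks, cur)
def pvSplitStep (st : List String × List (List String) × Option (List String)) (line : String) :
    List String × List (List String) × Option (List String) :=
  if PySem.Str.startswith line "[key " then
    match st.2.2 with
    | some c => (st.1, st.2.1 ++ [c], some [line])
    | none => (st.1, st.2.1, some [line])
  else
    match st.2.2 with
    | none => (st.1 ++ [line], st.2.1, none)
    | some c => (st.1, st.2.1, some (c ++ [line]))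

-- dict of one header block ('{index: b[0]}' scanned over b[1:])
def pvBlockDict (b : List String) : List (String × String) :=
  match b with
  | h :: t => (pvScan (PySem.Dict.ofList [("index", h)]) t).items
  | [] => []

def parse_mok_list_py_alt (output : String) : List (List (String × String)) :=
  let lines := ((PySem.Str.split? output "\n").getD []).map PySem.Str.strip
  let st := lines.foldl pvSplitStep ([], [], none)
  let blocks := match st.2.2 with
    | some c => st.2.1 ++ [c]
    | none => st.2.1
  let dicts := (pvScan PySem.Dict.empty st.1).items :: blocks.map pvBlockDict
  dicts.filter (fun d => !d.isEmpty)

-- ===== PRECONDITION & SPEC =====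
def Spec_parse_mok_list_py (output : String) (out : List (List (String × String))) : Prop := out = parse_mok_list_py_alt output
instance (output : String) (out : List (List (String × String))) : Decidable (Spec_parse_mok_list_py output out) := by unfold Spec_parse_mok_list_py; infer_instance

-- ===== CLAIM (what is proved, stated in full; the proofs are below) =====
def Claim_equal_parse_mok_list_py : Prop := ∀ (output : String), Dom_parse_mok_list_py output → Spec_parse_mok_list_py output (parse_mok_list_py output)

-- ===== LEMMAS AND PROOFS =====

-- proof-only helpers: a recursive description of the block partition
def pvG (c : List String) (ls : List String) : List (List String) :=
  match ls with
  | [] => [c]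
  | l :: rest =>
    if PySem.Str.startswith l "[key " then c :: pvG [l] rest else pvG (c ++ [l]) rest

def pvSplit0 : List String → List String × List (List String)
  | [] => ([], [])
  | l :: rest =>
    if PySem.Str.startswith l "[key " then ([], pvG [l] rest)
    else ((l :: (pvSplit0 rest).1), (pvSplit0 rest).2)

-- proof-only: A's remaining output from dict state d over stripped lines
def pvEmit (d : PySem.Dict String String) (ls : List String) : List (List (String × String)) :=
  match ls with
  | [] => if d.items.isEmpty then [] else [d.items]
  | l :: rest =>
    if PySem.Str.startswith l "[key " then
      (if d.items.isEmpty then [] else [d.items]) ++ pvEmit (PySem.Dict.ofList [("index", l)]) rest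
    else pvEmit (pvLineDict d l) rest

-- unfolding equations (rfl; 'simp only [pvEmit]' &c. can time out on these)
theorem pvG_nil (c : List String) : pvG c [] = [c] := rfl

theorem pvG_cons (c : List String) (l : String) (rest : List String) :
    pvG c (l :: rest) =
      (if PySem.Str.startswith l "[key " then c :: pvG [l] rest else pvG (c ++ [l]) rest) := rfl

theorem pvSplit0_nil : pvSplit0 [] = ([], []) := rfl

theorem pvSplit0_cons (l : String) (rest : List String) :
    pvSplit0 (l :: rest) =
      (if PySem.Str.startswith l "[key " then ([], pvG [l] rest)
       else ((l :: (pvSplit0 rest).1), (pvSplit0 rest).2)) := rfl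

theorem pvEmit_nil (d : PySem.Dict String String) :
    pvEmit d [] = if d.items.isEmpty then [] else [d.items] := rfl

theorem pvEmit_cons (d : PySem.Dict String String) (l : String) (rest : List String) :
    pvEmit d (l :: rest) =
      (if PySem.Str.startswith l "[key " then
        (if d.items.isEmpty then [] else [d.items]) ++ pvEmit (PySem.Dict.ofList [("index", l)]) rest
      else pvEmit (pvLineDict d l) rest) := rfl

theorem pvScan_nil (d : PySem.Dict String String) : pvScan d [] = d := rfl

theorem pvScan_append_singleton (d : PySem.Dict String String) (t : List String) (l : String) :
    pvScan d (t ++ [l]) = pvLineDict (pvScan d t) l := by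
  simp [pvScan, List.foldl_append]

theorem pv_insert_items_ne_nil (d : PySem.Dict String String) (k v : String) :
    (d.insert k v).items ≠ [] := by
  unfold PySem.Dict.insert
  split_ifs with h
  · simp only [ne_eq, List.map_eq_nil_iff]
    intro he
    obtain ⟨items⟩ := d
    simp at he; subst he
    simp [PySem.Dict.contains] at h
  · simp

theorem pv_ofList_single (h : String) :
    (PySem.Dict.ofList [("index", h)] : PySem.Dict String String).items = [("index", h)] := rfl

theorem pvLineDict_ne_nil (d : PySem.Dict String String) (l : String) (h : d.items ≠ []) :
    (pvLineDict d l).items ≠ [] := by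
  unfold pvLineDict
  split_ifs <;> first | exact h | apply pv_insert_items_ne_nil

theorem pvScan_ne_nil (body : List String) (d : PySem.Dict String String) (h : d.items ≠ []) :
    (pvScan d body).items ≠ [] := by
  induction body generalizing d with
  | nil => exact h
  | cons l rest ih => exact ih _ (pvLineDict_ne_nil d l h)

theorem pvScan_seed_ne_nil (h : String) (t : List String) :
    (pvScan (PySem.Dict.ofList [("index", h)]) t).items ≠ [] :=
  pvScan_ne_nil t _ (by rw [pv_ofList_single]; simp)

theorem pvScan_seed_not_isEmpty (h : String) (t : List String) :
    ¬ ((pvScan (PySem.Dict.ofList [("index", h)]) t).items.isEmpty = true) := by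
  simpa [List.isEmpty_iff] using pvScan_seed_ne_nil h t

theorem pvAStep_nonheader (ks : List (List (String × String))) (d : PySem.Dict String String)
    (raw : String) (h : PySem.Str.startswith (PySem.Str.strip raw) "[key " = false) :
    pvAStep (ks, d) raw = (ks, pvLineDict d (PySem.Str.strip raw)) := by
  simp only [pvAStep, pvLineDict, h, Bool.false_eq_true, if_false]
  split_ifs <;> rfl

theorem pvAStep_header (ks : List (List (String × String))) (d : PySem.Dict String String)
    (raw : String) (h : PySem.Str.startswith (PySem.Str.strip raw) "[key " = true) :
    pvAStep (ks, d) raw = (if d.items.isEmpty then ks else ks ++ [d.items],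
      PySem.Dict.ofList [("index", PySem.Str.strip raw)]) := by
  simp only [pvAStep, h, if_true]

-- A's whole run equals pvEmit
theorem pvA_run (raws : List String) (ks : List (List (String × String)))
    (d : PySem.Dict String String) :
    (if (raws.foldl pvAStep (ks, d)).2.items.isEmpty then (raws.foldl pvAStep (ks, d)).1
      else (raws.foldl pvAStep (ks, d)).1 ++ [(raws.foldl pvAStep (ks, d)).2.items]) =
    ks ++ pvEmit d (raws.map PySem.Str.strip) := by
  induction raws generalizing ks d with
  | nil =>
    rw [List.foldl_nil, List.map_nil, pvEmit_nil]
    split_ifs <;> simp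
  | cons raw rest ih =>
    rw [List.foldl_cons, List.map_cons, pvEmit_cons]
    by_cases h : PySem.Str.startswith (PySem.Str.strip raw) "[key " = true
    · rw [pvAStep_header ks d raw h, ih, if_pos h]
      split_ifs with hd <;> simp
    · have h' : PySem.Str.startswith (PySem.Str.strip raw) "[key " = false := by
        simpa using h
      rw [pvAStep_nonheader ks d raw h', ih, if_neg h]

-- blocks produced by pvG from a nonempty partial block are nonempty
theorem pvG_mem_ne_nil (ls : List String) (h : String) (ts : List String) (b : List String)
    (hb : b ∈ pvG (h :: ts) ls) : b ≠ [] := by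
  induction ls generalizing h ts with
  | nil => rw [pvG_nil] at hb; simp at hb; subst hb; simp
  | cons l rest ih =>
    rw [pvG_cons] at hb
    split_ifs at hb with hl
    · rcases List.mem_cons.mp hb with rfl | hb'
      · simp
      · exact ih l [] hb'
    · rw [List.cons_append] at hb
      exact ih h (ts ++ [l]) hb

theorem pvSplit0_blocks_ne_nil (ls : List String) (b : List String)
    (hb : b ∈ (pvSplit0 ls).2) : b ≠ [] := by
  induction ls with
  | nil => rw [pvSplit0_nil] at hb; simp at hb
  | cons l rest ih =>
    rw [pvSplit0_cons] at hb
    split_ifs at hb with hl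
    · exact pvG_mem_ne_nil rest l [] b hb
    · exact ih hb

-- mapping the per-block dict over pvG equals pvEmit from the accumulated dict
theorem pvG_emit (ls : List String) (h : String) (t : List String) :
    (pvG (h :: t) ls).map pvBlockDict =
      pvEmit (pvScan (PySem.Dict.ofList [("index", h)]) t) ls := by
  induction ls generalizing h t with
  | nil =>
    rw [pvG_nil, List.map_cons, List.map_nil, pvEmit_nil,
      if_neg (pvScan_seed_not_isEmpty h t)]
    rfl
  | cons l rest ih =>
    by_cases hl : PySem.Str.startswith l "[key " = true
    · rw [pvG_cons, if_pos hl, pvEmit_cons, if_pos hl,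
        if_neg (pvScan_seed_not_isEmpty h t), List.map_cons]
      have hil := ih l []
      rw [pvScan_nil] at hil
      rw [hil]
      rfl
    · rw [pvG_cons, if_neg hl, pvEmit_cons, if_neg hl, List.cons_append, ih h (t ++ [l]),
        pvScan_append_singleton]

-- pvEmit in terms of the block partition
theorem pvEmit_split (ls : List String) (d : PySem.Dict String String) :
    pvEmit d ls =
      (if (pvScan d (pvSplit0 ls).1).items.isEmpty then []
        else [(pvScan d (pvSplit0 ls).1).items]) ++
      ((pvSplit0 ls).2).map pvBlockDict := by
  induction ls generalizing d with
  | nil =>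
    rw [pvEmit_nil, pvSplit0_nil]
    simp [pvScan]
  | cons l rest ih =>
    by_cases hl : PySem.Str.startswith l "[key " = true
    · rw [pvEmit_cons, if_pos hl, pvSplit0_cons, if_pos hl]
      have hgl := pvG_emit rest l []
      rw [pvScan_nil] at hgl
      simp only [pvScan_nil]
      rw [← hgl]
    · rw [pvEmit_cons, if_neg hl, pvSplit0_cons, if_neg hl, ih (pvLineDict d l)]
      simp [pvScan]

-- B's fold-based partition equals the recursive partition
def pvFin (st : List String × List (List String) × Option (List String)) :
    List String × List (List String) :=
  (st.1, match st.2.2 with | some c => st.2.1 ++ [c] | none => st.2.1)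

theorem pvSplitStep_some (lead : List String) (blocks : List (List String)) (c : List String)
    (line : String) :
    pvSplitStep (lead, blocks, some c) line =
      (if PySem.Str.startswith line "[key " then (lead, blocks ++ [c], some [line])
       else (lead, blocks, some (c ++ [line]))) := by
  unfold pvSplitStep
  split_ifs <;> rfl

theorem pvSplitStep_none (lead : List String) (blocks : List (List String)) (line : String) :
    pvSplitStep (lead, blocks, none) line =
      (if PySem.Str.startswith line "[key " then (lead, blocks, some [line])
       else (lead ++ [line], blocks, none)) := by
  unfold pvSplitStep
  split_ifs <;> rfl

theorem pvSplit_fold_some (ls : List String) (lead : List String)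
    (blocks : List (List String)) (c : List String) :
    pvFin (ls.foldl pvSplitStep (lead, blocks, some c)) = (lead, blocks ++ pvG c ls) := by
  induction ls generalizing blocks c with
  | nil => rfl
  | cons l rest ih =>
    rw [List.foldl_cons, pvSplitStep_some, pvG_cons]
    by_cases hl : PySem.Str.startswith l "[key " = true
    · rw [if_pos hl, if_pos hl, ih]
      simp
    · rw [if_neg hl, if_neg hl, ih]

theorem pvSplit_fold_none (ls : List String) (lead : List String) :
    pvFin (ls.foldl pvSplitStep (lead, [], none)) =
      (lead ++ (pvSplit0 ls).1, (pvSplit0 ls).2) := by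
  induction ls generalizing lead with
  | nil => rw [pvSplit0_nil]; simp [pvFin]
  | cons l rest ih =>
    rw [List.foldl_cons, pvSplitStep_none, pvSplit0_cons]
    by_cases hl : PySem.Str.startswith l "[key " = true
    · rw [if_pos hl, if_pos hl, pvSplit_fold_some]
      simp
    · rw [if_neg hl, if_neg hl, ih]
      simp

-- B equals pvEmit from the empty dict
theorem pvB_eq_emit (output : String) :
    parse_mok_list_py_alt output =
      pvEmit PySem.Dict.empty (((PySem.Str.split? output "\n").getD []).map PySem.Str.strip) := by
  have hport : parse_mok_list_py_alt output =
      ((pvScan PySem.Dict.empty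
          (pvFin ((((PySem.Str.split? output "\n").getD []).map PySem.Str.strip).foldl
            pvSplitStep ([], [], none))).1).items ::
        ((pvFin ((((PySem.Str.split? output "\n").getD []).map PySem.Str.strip).foldl
            pvSplitStep ([], [], none))).2).map pvBlockDict).filter
        (fun d => !d.isEmpty) := rfl
  rw [hport, pvSplit_fold_none _ [], List.nil_append]
  rw [pvEmit_split _ PySem.Dict.empty]
  rw [List.filter_cons]
  set ls := ((PySem.Str.split? output "\n").getD []).map PySem.Str.strip with hls
  have hall : List.filter (fun d => !d.isEmpty) (((pvSplit0 ls).2).map pvBlockDict) =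
      ((pvSplit0 ls).2).map pvBlockDict := by
    apply List.filter_eq_self.mpr
    intro x hx
    rcases List.mem_map.mp hx with ⟨b, hb, rfl⟩
    obtain ⟨h, t, rfl⟩ := List.exists_cons_of_ne_nil (pvSplit0_blocks_ne_nil ls b hb)
    simpa [List.isEmpty_iff, pvBlockDict] using pvScan_seed_ne_nil h t
  rw [hall]
  split_ifs with he <;> simp_all [List.isEmpty_iff]

-- ===== VERDICT (by name: the statement is the Claim_ definition above) =====
theorem parse_mok_list_py_spec : Claim_equal_parse_mok_list_py := by
  intro output _
  unfold Spec_parse_mok_list_py parse_mok_list_py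
  rw [pvB_eq_emit output]
  exact pvA_run _ [] PySem.Dict.empty
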